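-- pv_equiv track=rewrite | github.com/MrBrantCode/unitest_baseline | mut_generate/mist_train_cf/cf_96708/solution.py | find_most_common_integer
-- ===== SOURCE A (Python) =====
-- def find_most_common_integer(lst):
--     max_count = 0
--     most_common = None
--
--     for i in range(len(lst)):
--         if lst[i] > 0:
--             count = 0
--             for j in range(len(lst)):
--                 if lst[j] == lst[i]:
--                     count += 1
--             if count > max_count and lst.count(lst[i]) > lst.count(most_common) if most_common is not None else True:
--                 max_count = count
--                 most_common = lst[i]
--
--     return most_common
-- ===== SOURCE B (Python) =====
-- def find_most_common_integer(lst):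
--     counts = {}
--     for x in lst:
--         if x > 0:
--             counts[x] = counts.get(x, 0) + 1
--     if not counts:
--         return None
--     max_count = max(counts.values())
--     for x in lst:
--         if x > 0 and counts[x] == max_count:
--             return x
-- ===== Notes on version B (the rewrite author's own statement) =====
-- stated objective: alternative
-- what changed: Replaces A's nested rescan-per-element running-max loop with one frequency-table pass, a max over the table's values, and a first-match pass over the list.
import Mathlib
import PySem

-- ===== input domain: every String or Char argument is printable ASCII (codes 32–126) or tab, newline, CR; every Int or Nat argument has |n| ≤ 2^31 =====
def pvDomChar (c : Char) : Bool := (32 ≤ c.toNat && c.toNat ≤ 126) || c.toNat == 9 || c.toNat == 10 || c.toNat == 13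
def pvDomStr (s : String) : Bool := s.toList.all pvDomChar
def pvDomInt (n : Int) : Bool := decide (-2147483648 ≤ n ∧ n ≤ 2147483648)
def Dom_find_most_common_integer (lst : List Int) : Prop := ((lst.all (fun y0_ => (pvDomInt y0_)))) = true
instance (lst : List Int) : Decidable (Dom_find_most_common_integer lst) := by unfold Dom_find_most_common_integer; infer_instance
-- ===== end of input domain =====

-- B replaces A's rescan-per-element running-max loop with a frequency table,
-- a max over its values and a first-match pass (objective: alternative).

-- ===== PORT A =====
-- literal port of A: running max over indices, with a full recount of lst[i] at every positive i
def find_most_common_integer (lst : List Int) : Option Int :=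
  let st := (PySem.List.pyRange 0 (lst.length : Int) 1).foldl
    (fun (st : Int × Option Int) i =>
      let x := PySem.List.pyGetD lst i 0
      if 0 < x then
        let count := (PySem.List.pyRange 0 (lst.length : Int) 1).foldl
          (fun c j => if PySem.List.pyGetD lst j 0 = x then c + 1 else c) (0 : Int)
        let cond : Bool := match st.2 with
          | none => true
          | some v => decide (st.1 < count) && decide (PySem.List.count lst v < PySem.List.count lst x)
        if cond then (count, some x) else st
      else st)
    ((0 : Int), (none : Option Int))
  st.2

-- ===== PORT B =====
-- literal port of B: one counting pass over the positives, max of the table's values, first-match pass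
def find_most_common_integer_alt (lst : List Int) : Option Int :=
  let counts := lst.foldl
    (fun (d : PySem.Dict Int Int) x => if 0 < x then d.insert x (d.getD x 0 + 1) else d)
    PySem.Dict.empty
  if counts.size = 0 then none
  else
    match PySem.List.max? counts.values (fun y => y) with
    | none => none   -- unreachable: counts is nonempty here; Python's max never sees an empty list
    | some m => lst.find? (fun x => decide (0 < x) && decide (counts.getD x 0 = m))

-- ===== PRECONDITION & SPEC =====
def Spec_find_most_common_integer (lst : List Int) (out : Option Int) : Prop := out = find_most_common_integer_alt lst
instance (lst : List Int) (out : Option Int) : Decidable (Spec_find_most_common_integer lst out) := by unfold Spec_find_most_common_integer; infer_instance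

-- ===== CLAIM (what is proved, stated in full; the proofs are below) =====
def Claim_equal_find_most_common_integer : Prop := ∀ (lst : List Int), Dom_find_most_common_integer lst → Spec_find_most_common_integer lst (find_most_common_integer lst)

-- ===== LEMMAS AND PROOFS =====

-- the global count of y in lst, as an Int
def pvCnt (lst : List Int) (y : Int) : Int := (List.count y lst : Int)

-- A's loop body on a positive element, with the recount abstracted as f
def pvStep (f : Int → Int) (st : Int × Option Int) (y : Int) : Int × Option Int :=
  if (match st.2 with
      | none => true
      | some v => decide (st.1 < f y) && decide (f v < f y)) then (f y, some y) else st

-- B's frequency table, named for the proofs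
def pvCounts (lst : List Int) : PySem.Dict Int Int :=
  lst.foldl (fun d x => if 0 < x then d.insert x (d.getD x 0 + 1) else d) PySem.Dict.empty

lemma pvCountLoop (lst : List Int) (x : Int) :
    lst.foldl (fun c y => if y = x then c + 1 else c) (0 : Int) = (List.count x lst : Int) := by
  rw [show (fun (c : Int) (y : Int) => if y = x then c + 1 else c)
        = fun (c : Int) (y : Int) => if (fun z => z == x) y = true then c + 1 else c from by
      funext c y; simp]
  rw [PySem.List.foldl_count_if (fun z => z == x) lst 0]
  simp [List.count_eq_countP]

-- the outer loop body of A, as a function of lst[i]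
def pvBody (lst : List Int) (st : Int × Option Int) (x : Int) : Int × Option Int :=
  if 0 < x then
    let count := (PySem.List.pyRange 0 (lst.length : Int) 1).foldl
      (fun c j => if PySem.List.pyGetD lst j 0 = x then c + 1 else c) (0 : Int)
    let cond : Bool := match st.2 with
      | none => true
      | some v => decide (st.1 < count) && decide (PySem.List.count lst v < PySem.List.count lst x)
    if cond then (count, some x) else st
  else st

lemma pvInnerCount (lst : List Int) (x : Int) :
    (PySem.List.pyRange 0 (lst.length : Int) 1).foldl
      (fun c j => if PySem.List.pyGetD lst j 0 = x then c + 1 else c) (0 : Int)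
      = (List.count x lst : Int) := by
  show (List.foldl (fun acc j => (fun (c : Int) (y : Int) => if y = x then c + 1 else c) acc
      (PySem.List.pyGetD lst j 0)) 0 (PySem.List.pyRange 0 (lst.length : Int))) = _
  rw [PySem.List.foldl_pyRange_zero_pyGetD' lst 0 (fun (c : Int) (y : Int) => if y = x then c + 1 else c) 0]
  exact pvCountLoop lst x

lemma pvA_reduce (lst : List Int) :
    find_most_common_integer lst =
      ((lst.filter (fun x => decide (0 < x))).foldl (pvStep (pvCnt lst)) ((0 : Int), none)).2 := by
  show (List.foldl (fun acc j => pvBody lst acc (PySem.List.pyGetD lst j 0)) ((0 : Int), none)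
      (PySem.List.pyRange 0 (lst.length : Int))).2 = _
  rw [PySem.List.foldl_pyRange_zero_pyGetD' lst 0 (pvBody lst) ((0 : Int), (none : Option Int))]
  rw [List.foldl_filter]
  congr 1
  apply PySem.List.foldl_congr_mem
  intro st x _
  unfold pvBody
  by_cases hx : 0 < x
  · obtain ⟨mc, mo⟩ := st
    cases mo <;> simp [hx, pvInnerCount, pvStep, pvCnt, PySem.List.count_eq]
  · simp [hx]

lemma pvB_eq (lst : List Int) :
    find_most_common_integer_alt lst =
      (if (pvCounts lst).size = 0 then none
       else match PySem.List.max? (pvCounts lst).values (fun y => y) with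
         | none => none
         | some m => lst.find? (fun x => decide (0 < x) && decide ((pvCounts lst).getD x 0 = m))) := rfl

lemma pvCounts_filter (lst : List Int) :
    pvCounts lst = (lst.filter (fun x => decide (0 < x))).foldl
      (fun (d : PySem.Dict Int Int) x => d.insert x (d.getD x 0 + 1)) PySem.Dict.empty := by
  unfold pvCounts
  rw [List.foldl_filter]
  apply PySem.List.foldl_congr_mem
  intro d x _
  by_cases hx : 0 < x <;> simp [hx]

lemma pvCounts_keys (lst : List Int) :
    (pvCounts lst).keys = PySem.Set.ofList (lst.filter (fun x => decide (0 < x))) := by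
  rw [pvCounts_filter, PySem.Dict.keys_foldl_insert, PySem.Dict.keys_empty,
    PySem.Set.ofList_eq_foldl]
  rfl

lemma pvCounts_getD (lst : List Int) (v : Int) :
    (pvCounts lst).getD v 0 = (List.count v (lst.filter (fun x => decide (0 < x))) : Int) := by
  rw [pvCounts_filter, PySem.Dict.getD_foldl_insert_add_one, PySem.Dict.getD_empty]
  simp

lemma pvSet_ofList_eq_nil {l : List Int} (h : PySem.Set.ofList l = []) : l = [] := by
  cases l with
  | nil => rfl
  | cons a t =>
    have := (PySem.Set.mem_ofList (a :: t) a).2 (List.mem_cons_self)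
    rw [h] at this
    exact absurd this (List.not_mem_nil)

lemma pvCounts_size_zero (lst : List Int) :
    (pvCounts lst).size = 0 ↔ lst.filter (fun x => decide (0 < x)) = [] := by
  have hk : (pvCounts lst).keys.length = (pvCounts lst).size := by
    simp [PySem.Dict.keys, PySem.Dict.size]
  constructor
  · intro h
    have : (pvCounts lst).keys = [] := List.length_eq_zero_iff.1 (by rw [hk, h])
    rw [pvCounts_keys] at this
    exact pvSet_ofList_eq_nil this
  · intro h
    have : (pvCounts lst).keys = [] := by rw [pvCounts_keys, h]; rfl
    rw [← hk, this]
    rfl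

-- B's first-match pass over lst is a find over the positives
lemma pvFind_filter (lst : List Int) (q r : Int → Bool)
    (h : ∀ x ∈ lst, 0 < x → q x = r x) :
    (lst.filter (fun x => decide (0 < x))).find? q
      = lst.find? (fun x => decide (0 < x) && r x) := by
  induction lst with
  | nil => rfl
  | cons a t ih =>
    have ht : ∀ x ∈ t, 0 < x → q x = r x := fun x hx => h x (List.mem_cons_of_mem a hx)
    by_cases ha : 0 < a
    · rw [show (a :: t).filter (fun x => decide (0 < x)) = a :: t.filter (fun x => decide (0 < x)) from by
          simp [ha]]
      have hqa := h a (List.mem_cons_self) ha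
      by_cases hq : q a = true
      · simp [hq, ha, ← hqa]
      · have hqf : q a = false := Bool.eq_false_iff.2 hq
        simp only [List.find?, hqf, ← hqa, ha, decide_true, Bool.true_and]
        exact ih ht
    · rw [show (a :: t).filter (fun x => decide (0 < x)) = t.filter (fun x => decide (0 < x)) from by
          simp [ha]]
      simp only [List.find?, ha, decide_false, Bool.false_and]
      exact ih ht

-- counts among the positives agree with global counts on positive values
lemma pvCount_pos (lst : List Int) (x : Int) (hx : 0 < x) :
    List.count x (lst.filter (fun z => decide (0 < z))) = List.count x lst :=
  List.count_filter (by simp [hx])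

-- the running strict max picks the first achiever of the global max
lemma pvRunMax (f : Int → Int) (l : List Int) (hl : l ≠ []) :
    ∃ M w, l.foldl (pvStep f) ((0 : Int), none) = (M, some w) ∧
      (∀ y ∈ l, f y ≤ M) ∧ l.find? (fun y => f y == M) = some w ∧ w ∈ l ∧ f w = M := by
  induction l using List.reverseRecOn with
  | nil => exact absurd rfl hl
  | append_singleton l y ih =>
    rcases eq_or_ne l [] with h | h
    · subst h
      refine ⟨f y, y, ?_, ?_, ?_, ?_, rfl⟩ <;> simp [pvStep]
    · obtain ⟨M, w, hfold, hmax, hfind, hmem, hfw⟩ := ih h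
      rw [List.foldl_append, hfold]
      by_cases hy : M < f y
      · refine ⟨f y, y, ?_, ?_, ?_, ?_, rfl⟩
        · simp [pvStep, hy, hfw]
        · intro z hz
          rcases List.mem_append.1 hz with hz | hz
          · exact le_of_lt (lt_of_le_of_lt (hmax z hz) hy)
          · simp [List.mem_singleton.1 hz]
        · rw [List.find?_append]
          have hn : l.find? (fun z => f z == f y) = none := by
            rw [List.find?_eq_none]
            intro z hz
            simp only [beq_iff_eq]
            exact ne_of_lt (lt_of_le_of_lt (hmax z hz) hy)
          simp [hn]
        · simp
      · refine ⟨M, w, ?_, ?_, ?_, ?_, hfw⟩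
        · simp [pvStep, hy, hfw]
        · intro z hz
          rcases List.mem_append.1 hz with hz | hz
          · exact hmax z hz
          · rw [List.mem_singleton.1 hz]; exact le_of_not_gt hy
        · rw [List.find?_append, hfind]; rfl
        · exact List.mem_append.2 (Or.inl hmem)

-- ===== VERDICT (by name: the statement is the Claim_ definition above) =====
theorem find_most_common_integer_spec : Claim_equal_find_most_common_integer := by
  intro lst _
  unfold Spec_find_most_common_integer
  rw [pvA_reduce, pvB_eq]
  rcases eq_or_ne (lst.filter (fun x => decide (0 < x))) [] with hp | hp
  · rw [if_pos ((pvCounts_size_zero lst).2 hp), hp]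
    rfl
  · rw [if_neg (fun h0 => hp ((pvCounts_size_zero lst).1 h0))]
    obtain ⟨M, w, hfold, hmax, hfind, hwmem, hfw⟩ := pvRunMax (pvCnt lst) (lst.filter (fun x => decide (0 < x))) hp
    have hwpos : 0 < w := by
      have := List.of_mem_filter hwmem
      simpa using this
    have hnodup : (pvCounts lst).keys.Nodup := by
      rw [pvCounts_keys]; exact PySem.Set.nodup_ofList _
    have hvals : (pvCounts lst).values
        = (PySem.Set.ofList (lst.filter (fun x => decide (0 < x)))).map
            (fun k => (pvCounts lst).getD k 0) := by
      rw [PySem.Dict.values_eq_map_keys (pvCounts lst) hnodup 0, pvCounts_keys]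
    have hmaxv : PySem.List.max? (pvCounts lst).values (fun y => y) = some M := by
      have hvne : (pvCounts lst).values ≠ [] := by
        intro h0
        rw [hvals] at h0
        have hnil := List.map_eq_nil_iff.1 h0
        have hw := (PySem.Set.mem_ofList _ w).2 hwmem
        rw [hnil] at hw
        exact absurd hw (List.not_mem_nil)
      obtain ⟨m, hm⟩ := Option.ne_none_iff_exists'.1
        (fun h0 => hvne ((PySem.List.max?_eq_none_iff (pvCounts lst).values (fun y => y)).1 h0))
      rw [hm]
      congr 1
      have hmmem := PySem.List.max?_mem hm
      rw [hvals] at hmmem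
      obtain ⟨k, hk, hkm⟩ := List.mem_map.1 hmmem
      have hkpos' : k ∈ lst.filter (fun x => decide (0 < x)) := (PySem.Set.mem_ofList _ k).1 hk
      have hkpos : 0 < k := by
        have := List.of_mem_filter hkpos'
        simpa using this
      have hmle : m ≤ M := by
        rw [← hkm, pvCounts_getD lst k, pvCount_pos lst k hkpos]
        exact hmax k hkpos'
      have hMle : M ≤ m := by
        have hwv : ((pvCounts lst).getD w 0) ∈ (pvCounts lst).values := by
          rw [hvals]
          exact List.mem_map.2 ⟨w, (PySem.Set.mem_ofList _ w).2 hwmem, rfl⟩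
        have hle := PySem.List.max?_isMax (key := fun y => y) hm _ hwv
        rw [pvCounts_getD lst w, pvCount_pos lst w hwpos] at hle
        exact le_trans (le_of_eq hfw.symm) hle
      exact le_antisymm hmle hMle
    rw [hmaxv, hfold]
    show some w = _
    rw [← hfind]
    apply pvFind_filter
    intro x _ hx
    rw [pvCounts_getD lst x, pvCount_pos lst x hx]
    unfold pvCnt
    by_cases h : ((List.count x lst : Int)) = M <;> simp [h]
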